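-- pv_equiv track=rewrite | github.com/jiefxxx/PyMediaCenter | common_lib/videos_info.py | normalize_filename
-- ===== SOURCE A (Python) =====
-- def normalize_filename(name):
--     banished = ('.',)
--     replace = ('\'', ':', ',', ' ', '/')
--     name = name.lower()
--     for item in banished:
--         name = name.replace(item, '')
--     for item in replace:
--         name = name.replace(item, '.')
--
--     return name
-- ===== SOURCE B (Python) =====
-- def normalize_filename(name):
--     replace = {"'", ':', ',', ' ', '/'}
--     out = []
--     for ch in name:
--         c = ch.lower()
--         if c == '.':
--             continue
--         out.append('.' if c in replace else c)
--     return ''.join(out)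
-- ===== Notes on version B (the rewrite author's own statement) =====
-- stated objective: alternative
-- what changed: Replaces six successive whole-string .replace scans (with intermediate strings) by a single pass over the characters with a membership set and an output accumulator.
import Mathlib
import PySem

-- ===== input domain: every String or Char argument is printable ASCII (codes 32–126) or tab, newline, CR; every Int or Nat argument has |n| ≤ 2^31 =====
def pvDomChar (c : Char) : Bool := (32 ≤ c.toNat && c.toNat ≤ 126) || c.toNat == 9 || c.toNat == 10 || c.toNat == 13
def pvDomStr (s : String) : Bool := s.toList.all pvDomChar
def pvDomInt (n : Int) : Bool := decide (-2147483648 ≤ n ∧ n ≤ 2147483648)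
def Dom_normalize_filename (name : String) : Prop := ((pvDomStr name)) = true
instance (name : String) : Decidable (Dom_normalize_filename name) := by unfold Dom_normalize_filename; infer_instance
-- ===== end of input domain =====

-- B replaces A's six successive whole-string .replace passes by a single pass over the characters with a membership set and an output accumulator.

-- ===== PORT A =====
def normalize_filename (name : String) : String :=
  let banished : List String := ["."]
  let replace : List String := ["'", ":", ",", " ", "/"]
  let name1 := PySem.Str.lower name
  let name2 := banished.foldl (fun s item => PySem.Str.replace s item "") name1
  let name3 := replace.foldl (fun s item => PySem.Str.replace s item ".") name2
  name3

-- ===== PORT B =====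
def normalize_filename_alt (name : String) : String :=
  let repl : List Char := ['\'', ':', ',', ' ', '/']
  String.ofList (name.toList.foldl (fun out ch =>
    let c := PySem.Chars.lowerChar ch
    if c = '.' then out
    else out ++ [if c ∈ repl then '.' else c]) [])

-- ===== PRECONDITION & SPEC =====
def Spec_normalize_filename (name : String) (out : String) : Prop := out = normalize_filename_alt name
instance (name : String) (out : String) : Decidable (Spec_normalize_filename name out) := by unfold Spec_normalize_filename; infer_instance

-- ===== CLAIM (what is proved, stated in full; the proofs are below) =====
def Claim_equal_normalize_filename : Prop := ∀ (name : String), Dom_normalize_filename name → Spec_normalize_filename name (normalize_filename name)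

-- ===== LEMMAS AND PROOFS =====

-- replace with a single-character pattern is a flatMap over the characters
theorem replace_go_single (p : Char) (new : List Char) :
    ∀ (cs acc : List Char) (fuel : Nat), cs.length ≤ fuel →
      PySem.Chars.replace.go [p] new fuel cs acc
        = acc.reverse ++ cs.flatMap (fun c => if c = p then new else [c]) := by
  intro cs
  induction cs with
  | nil =>
      intro acc fuel _
      cases fuel <;> simp [PySem.Chars.replace.go]
  | cons c t ih =>
      intro acc fuel hf
      cases fuel with
      | zero => simp at hf
      | succ n =>
        rw [PySem.Chars.replace.go]
        by_cases h : c = p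
        · subst h
          have hp : List.isPrefixOf [c] (c :: t) = true := by
            simp [List.isPrefixOf]
          rw [hp, if_pos rfl]
          simp only [List.length_cons, List.length_nil, List.drop_succ_cons, List.drop_zero]
          rw [ih _ n (by simpa using Nat.le_of_succ_le_succ hf)]
          simp
        · have hp : List.isPrefixOf [p] (c :: t) = false := by
            simp [List.isPrefixOf, Ne.symm h]
          rw [hp]
          simp only [Bool.false_eq_true, if_false]
          rw [ih _ n (by simpa using Nat.le_of_succ_le_succ hf)]
          simp [h]

theorem replace_single (cs : List Char) (p : Char) (new : List Char) :
    PySem.Chars.replace cs [p] new = cs.flatMap (fun c => if c = p then new else [c]) := by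
  rw [PySem.Chars.replace, if_neg (by simp)]
  simpa using replace_go_single p new cs [] cs.length le_rfl

-- the five sequential single-char substitutions, applied to one (filtered) character
theorem point (d : Char) :
    (((((List.flatMap (fun c => if c = '/' then ['.'] else [c])
        (List.flatMap (fun c => if c = ' ' then ['.'] else [c])
        (List.flatMap (fun c => if c = ',' then ['.'] else [c])
        (List.flatMap (fun c => if c = ':' then ['.'] else [c])
        (List.flatMap (fun c => if c = '\'' then ['.'] else [c])
        (if d = '.' then ([] : List Char) else [d]))))))))))
    = (if d = '.' then [] else [if d ∈ ['\'', ':', ',', ' ', '/'] then '.' else d]) := by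
  by_cases h : d = '.'
  · simp [h]
  · simp only [h, if_false]
    by_cases h1 : d = '\'' <;> by_cases h2 : d = ':' <;> by_cases h3 : d = ',' <;>
      by_cases h4 : d = ' ' <;> by_cases h5 : d = '/' <;> simp_all

theorem flatMap_comp (l : List Char) (f g : Char → List Char) :
    (l.flatMap f).flatMap g = l.flatMap (fun x => (f x).flatMap g) := by
  induction l with
  | nil => simp
  | cons a t ih => simp [List.flatMap_append, ih]

theorem map_flatMap' (l : List Char) (f : Char → Char) (g : Char → List Char) :
    (l.map f).flatMap g = l.flatMap (fun x => g (f x)) := by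
  induction l with
  | nil => simp
  | cons a t ih => simp [ih]

-- B's accumulator loop as a flatMap
theorem alt_foldl_eq (l out : List Char) :
    (l.foldl (fun out ch =>
      let c := PySem.Chars.lowerChar ch
      if c = '.' then out
      else out ++ [if c ∈ ['\'', ':', ',', ' ', '/'] then '.' else c]) out)
    = out ++ l.flatMap (fun ch =>
        let c := PySem.Chars.lowerChar ch
        if c = '.' then []
        else [if c ∈ ['\'', ':', ',', ' ', '/'] then '.' else c]) := by
  induction l generalizing out with
  | nil => simp
  | cons ch t ih =>
      simp only [List.foldl_cons, List.flatMap_cons, ih]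
      by_cases h : PySem.Chars.lowerChar ch = '.' <;> simp [h]

-- ===== VERDICT (by name: the statement is the Claim_ definition above) =====
theorem normalize_filename_spec : Claim_equal_normalize_filename := by
  intro name _
  unfold Spec_normalize_filename normalize_filename normalize_filename_alt
  simp only [List.foldl_cons, List.foldl_nil]
  apply String.toList_injective
  simp only [PySem.Str.toList_replace, PySem.Str.toList_lower]
  rw [show (".":String).toList = ['.'] from rfl, show ("":String).toList = [] from rfl,
      show ("'":String).toList = ['\''] from rfl, show (":":String).toList = [':'] from rfl,
      show (",":String).toList = [','] from rfl, show (" ":String).toList = [' '] from rfl,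
      show ("/":String).toList = ['/'] from rfl]
  rw [replace_single, replace_single, replace_single, replace_single, replace_single, replace_single]
  rw [alt_foldl_eq]
  simp only [List.nil_append, String.toList_ofList]
  rw [PySem.Chars.lower]
  simp only [flatMap_comp]
  rw [map_flatMap']
  congr 1
  funext x
  rw [← point (PySem.Chars.lowerChar x)]
  simp only [flatMap_comp]
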